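-- pv_equiv track=rewrite | github.com/design-of-computer-programs/advent2017 | day9.py | delete_garbage
-- ===== SOURCE A (Python) =====
-- def delete_garbage(line):
--     collected_chars = []
--
--     skip = False
--
--     for c in line:
--         if c == '>' and skip: skip = False
--         if c == '<' and not skip: skip = True
--
--         if not skip and c != '>':
--             collected_chars.append(c)
--
--
--     return ''.join(collected_chars)
-- ===== SOURCE B (Python) =====
-- def delete_garbage(line):
--     # Chunk scan: jump between garbage sections with find() instead of a per-char flag.
--     out = []
--     s = line
--     while True:
--         j = s.find('<')
--         if j == -1:
--             out.append(''.join(c for c in s if c != '>'))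
--             break
--         out.append(''.join(c for c in s[:j] if c != '>'))
--         k = s.find('>', j)
--         if k == -1:
--             break
--         s = s[k+1:]
--     return ''.join(out)
-- ===== Notes on version B (the rewrite author's own statement) =====
-- stated objective: alternative
-- what changed: Replaces A's per-character skip-flag state machine by a chunk scan that jumps between garbage sections with str.find, filters the garbage-closing character out of each kept chunk, and joins the chunks.
import Mathlib
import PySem

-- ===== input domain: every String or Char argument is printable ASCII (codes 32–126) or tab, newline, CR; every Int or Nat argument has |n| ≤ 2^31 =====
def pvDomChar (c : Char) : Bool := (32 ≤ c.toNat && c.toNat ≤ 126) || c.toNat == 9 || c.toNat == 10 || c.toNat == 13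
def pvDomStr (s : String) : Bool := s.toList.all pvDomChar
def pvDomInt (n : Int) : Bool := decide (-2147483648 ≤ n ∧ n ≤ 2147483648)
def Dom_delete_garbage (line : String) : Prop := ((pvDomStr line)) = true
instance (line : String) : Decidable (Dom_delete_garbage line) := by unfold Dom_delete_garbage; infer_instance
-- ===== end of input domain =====

-- B replaces A's per-character skip-flag loop by a chunk scan that jumps between
-- garbage sections with find(); objective: alternative (same asymptotic cost).

-- ===== PORT A =====
-- one loop iteration of A: update 'skip' (two ifs, in A's order), then maybe collect c
def dgStep (st : List Char × Bool) (c : Char) : List Char × Bool :=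
  let skip1 := if c = '>' ∧ st.2 = true then false else st.2
  let skip2 := if c = '<' ∧ skip1 = false then true else skip1
  let coll := if skip2 = false ∧ c ≠ '>' then st.1 ++ [c] else st.1
  (coll, skip2)

def delete_garbage (line : String) : String :=
  String.ofList (line.toList.foldl dgStep ([], false)).1

-- ===== PORT B =====
-- decomposition facts cited by altChunks' decreasing_by (and reused by the proofs below):
-- a successful find splits s at the first occurrence …
theorem dg_find_decomp (s : List Char) (c : Char) (h : PySem.Chars.find s [c] ≠ -1) :
    ∃ u v, s = u ++ c :: v ∧ c ∉ u ∧ PySem.Chars.find s [c] = (u.length : Int) := by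
  have hnn : 0 ≤ PySem.Chars.find s [c] :=
    (PySem.Chars.find_nonneg_iff s [c]).mpr ((PySem.Chars.find_ne_neg_one_iff s [c]).mp h)
  obtain ⟨hp, hmin⟩ := PySem.Chars.find_spec (s := s) (sub := [c]) hnn
  set n := (PySem.Chars.find s [c]).toNat with hn
  obtain ⟨t, ht⟩ := hp
  have hlt : n < s.length := by
    by_contra hge
    have : s.drop n = [] := List.drop_eq_nil_of_le (by omega)
    simp [this] at ht
  refine ⟨s.take n, t, ?_, ?_, ?_⟩
  · have := List.take_append_drop n s
    rw [← ht] at this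
    simpa using this.symm
  · intro hmem
    obtain ⟨i, hi, hieq⟩ := List.mem_iff_getElem.mp hmem
    have hilt : i < n := by simp [List.length_take] at hi; omega
    refine hmin i hilt ?_
    rw [List.drop_eq_getElem_cons (by omega)]
    refine ⟨s.drop (i+1), ?_⟩
    have : s[i] = c := by rw [← List.getElem_take (h := hi)]; exact hieq
    simp [this]
  · rw [List.length_take, Nat.min_eq_left hlt.le, hn, Int.toNat_of_nonneg hnn]

-- … and when the second find succeeds too, s = u ++ '<' :: w ++ '>' :: t at the two positions
theorem dg_full_decomp (s : List Char)
    (hj : PySem.Chars.find s ['<'] ≠ -1)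
    (hk : PySem.Chars.findFrom s ['>'] (PySem.Chars.find s ['<']) ≠ -1) :
    ∃ u w t, s = u ++ '<' :: (w ++ '>' :: t) ∧ '<' ∉ u ∧ '>' ∉ w ∧
      PySem.Chars.find s ['<'] = (u.length : Int) ∧
      PySem.Chars.findFrom s ['>'] (PySem.Chars.find s ['<'])
        = ((u.length : Int) + 1 + (w.length : Int)) := by
  obtain ⟨u, v, hs, hu, hjv⟩ := dg_find_decomp s '<' hj
  have hul : u.length ≤ s.length := by subst hs; simp
  have hdrop : s.drop u.length = '<' :: v := by subst hs; simp
  rw [hjv, PySem.Chars.findFrom_natCast s ['>'] u.length hul, hdrop] at hk ⊢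
  by_cases hm : PySem.Chars.find ('<' :: v) ['>'] = -1
  · simp [hm] at hk
  · obtain ⟨w', v', hs2, hw', hmv⟩ := dg_find_decomp ('<' :: v) '>' hm
    cases w' with
    | nil => simp at hs2
    | cons a w =>
      obtain ⟨ha, hv⟩ : a = '<' ∧ v = w ++ '>' :: v' := by
        have := hs2; simp at this; exact ⟨this.1.symm, this.2⟩
      refine ⟨u, w, v', by rw [hs, hv], hu, fun hmem => hw' (List.mem_cons_of_mem _ hmem), rfl, ?_⟩
      rw [if_neg hm, hmv]
      simp; ring

-- the chunk loop of Source B: while True with cursor jumps, transcribed as recursion on the tail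
def altChunks (s : List Char) : List (List Char) :=
  let j := PySem.Chars.find s ['<']
  if hj : j = -1 then
    [s.filter (fun c => c ≠ '>')]
  else
    let pre := (PySem.List.slice s none (some j)).filter (fun c => c ≠ '>')
    let k := PySem.Chars.findFrom s ['>'] j
    if hk : k = -1 then
      [pre]
    else
      pre :: altChunks (PySem.List.slice s (some (k + 1)) none)
termination_by s.length
decreasing_by
  obtain ⟨u, w, t, hs, _, _, hjv, hkv⟩ := dg_full_decomp s hj hk
  have hkk : k = (u.length : Int) + 1 + (w.length : Int) := hkv
  have hk1 : k + 1 = ((u.length + w.length + 2 : Nat) : Int) := by rw [hkk]; push_cast; ring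
  rw [hk1, PySem.List.slice_from_natCast]
  subst hs
  simp

def delete_garbage_alt (line : String) : String :=
  String.ofList (PySem.Chars.join [] (altChunks line.toList))

-- ===== PRECONDITION & SPEC =====
def Spec_delete_garbage (line : String) (out : String) : Prop := out = delete_garbage_alt line
instance (line : String) (out : String) : Decidable (Spec_delete_garbage line out) := by unfold Spec_delete_garbage; infer_instance

-- ===== CLAIM (what is proved, stated in full; the proofs are below) =====
def Claim_equal_delete_garbage : Prop := ∀ (line : String), Dom_delete_garbage line → Spec_delete_garbage line (delete_garbage line)

-- ===== LEMMAS AND PROOFS =====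

-- reference state machine: the value both programs compute, proof-side only
def dgRef : Bool → List Char → List Char
  | _, [] => []
  | false, c :: cs =>
      if c = '<' then dgRef true cs
      else if c = '>' then dgRef false cs
      else c :: dgRef false cs
  | true, c :: cs => if c = '>' then dgRef false cs else dgRef true cs

theorem foldl_dgStep_eq (cs : List Char) (acc : List Char) (skip : Bool) :
    (cs.foldl dgStep (acc, skip)).1 = acc ++ dgRef skip cs := by
  induction cs generalizing acc skip with
  | nil => simp [dgRef]
  | cons c cs ih =>
    cases skip with
    | false =>
      by_cases h1 : c = '<'
      · subst h1; simp [List.foldl, dgStep, dgRef, ih]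
      · by_cases h2 : c = '>'
        · subst h2; simp [List.foldl, dgStep, dgRef, ih]
        · simp [List.foldl, dgStep, dgRef, h1, h2, ih]
    | true =>
      by_cases h2 : c = '>'
      · subst h2; simp [List.foldl, dgStep, dgRef, ih]
      · by_cases h1 : c = '<'
        · subst h1; simp [List.foldl, dgStep, dgRef, h2, ih]
        · simp [List.foldl, dgStep, dgRef, h1, h2, ih]

theorem dgRef_false_append (u t : List Char) (hu : '<' ∉ u) :
    dgRef false (u ++ t) = u.filter (fun c => c ≠ '>') ++ dgRef false t := by
  induction u with
  | nil => simp
  | cons c u ih =>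
    have hc : c ≠ '<' := fun h => hu (h ▸ List.mem_cons_self)
    have hu' : '<' ∉ u := fun h => hu (List.mem_cons_of_mem _ h)
    by_cases h2 : c = '>'
    · subst h2; simp [dgRef, ih hu']
    · simp [dgRef, hc, h2, ih hu']

theorem dgRef_true_append (w t : List Char) (hw : '>' ∉ w) :
    dgRef true (w ++ '>' :: t) = dgRef false t := by
  induction w with
  | nil => simp [dgRef]
  | cons c w ih =>
    have hc : c ≠ '>' := fun h => hw (h ▸ List.mem_cons_self)
    simp [dgRef, hc, ih (fun h => hw (List.mem_cons_of_mem _ h))]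

theorem dgRef_true_no_gt (w : List Char) (hw : '>' ∉ w) : dgRef true w = [] := by
  induction w with
  | nil => simp [dgRef]
  | cons c w ih =>
    have hc : c ≠ '>' := fun h => hw (h ▸ List.mem_cons_self)
    simp [dgRef, hc, ih (fun h => hw (List.mem_cons_of_mem _ h))]

theorem join_nil_eq_flatten (ps : List (List Char)) :
    PySem.Chars.join [] ps = ps.flatten := by
  induction ps with
  | nil => simp [PySem.Chars.join_nil]
  | cons p rest ih =>
    cases rest with
    | nil => simp [PySem.Chars.join_singleton]
    | cons q rest' => rw [PySem.Chars.join_cons_cons]; simp [ih]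

theorem not_mem_of_find_eq (s : List Char) (c : Char) (h : PySem.Chars.find s [c] = -1) :
    c ∉ s := fun hmem =>
  (PySem.Chars.find_eq_neg_one_iff s [c]).mp h ((List.singleton_infix_iff c s).mpr hmem)

theorem altChunks_flatten_aux (n : Nat) :
    ∀ s : List Char, s.length ≤ n → (altChunks s).flatten = dgRef false s := by
  induction n with
  | zero =>
    intro s hs
    have : s = [] := List.eq_nil_of_length_eq_zero (by omega)
    subst this
    rw [altChunks.eq_def]
    norm_num [dgRef]
    decide
  | succ n ih =>
    intro s hs
    rw [altChunks.eq_def]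
    by_cases hj : PySem.Chars.find s ['<'] = -1
    · simp only [hj, dif_pos]
      have hu : '<' ∉ s := not_mem_of_find_eq s '<' hj
      have := dgRef_false_append s [] hu
      simp at this
      simp [this, dgRef]
    · by_cases hk : PySem.Chars.findFrom s ['>'] (PySem.Chars.find s ['<']) = -1
      · simp only [hj, hk, dif_neg, dif_pos, not_false_iff]
        obtain ⟨u, v, hseq, hu, hjv⟩ := dg_find_decomp s '<' hj
        have hpre : (PySem.List.slice s none (some (PySem.Chars.find s ['<']))).filter
            (fun c => c ≠ '>') = u.filter (fun c => c ≠ '>') := by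
          rw [hjv, PySem.List.slice_to_natCast, hseq, List.take_left]
        have hul : u.length ≤ s.length := by rw [hseq]; simp
        have hdrop : s.drop u.length = '<' :: v := by rw [hseq]; simp
        rw [hjv, PySem.Chars.findFrom_natCast s ['>'] u.length hul, hdrop] at hk
        have hm : PySem.Chars.find ('<' :: v) ['>'] = -1 := by
          by_contra hm; simp [hm] at hk
          have : 0 ≤ PySem.Chars.find ('<' :: v) ['>'] :=
            (PySem.Chars.find_nonneg_iff _ _).mpr ((PySem.Chars.find_ne_neg_one_iff _ _).mp hm)
          omega
        have hv : '>' ∉ v := fun hmem =>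
          (not_mem_of_find_eq _ '>' hm) (List.mem_cons_of_mem _ hmem)
        rw [hpre, hseq, dgRef_false_append u ('<' :: v) hu]
        simp [dgRef, dgRef_true_no_gt v hv]
      · simp only [hj, hk, dif_neg, not_false_iff]
        obtain ⟨u, w, t, hs2, hu, hw, hjv, hkv⟩ := dg_full_decomp s hj hk
        have hpre : (PySem.List.slice s none (some (PySem.Chars.find s ['<']))).filter
            (fun c => c ≠ '>') = u.filter (fun c => c ≠ '>') := by
          rw [hjv, PySem.List.slice_to_natCast, hs2]
          rw [show '<' :: (w ++ '>' :: t) = ('<' :: (w ++ '>' :: t)) from rfl, List.take_left]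
        have hk1 : PySem.Chars.findFrom s ['>'] (PySem.Chars.find s ['<']) + 1
            = ((u.length + w.length + 2 : Nat) : Int) := by rw [hkv]; push_cast; ring
        rw [hk1, PySem.List.slice_from_natCast]
        have hdropt : s.drop (u.length + w.length + 2) = t := by
          rw [hs2]
          have hre : u ++ '<' :: (w ++ '>' :: t) = (u ++ '<' :: w ++ ['>']) ++ t := by simp
          have hlen : u.length + w.length + 2 = (u ++ '<' :: w ++ ['>']).length := by
            simp; omega
          rw [hre, hlen, List.drop_left]
        rw [hdropt]
        have htle : t.length ≤ n := by
          have : s.length = u.length + w.length + 2 + t.length := by rw [hs2]; simp; omega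
          omega
        rw [List.flatten_cons, ih t htle, hpre, hs2, dgRef_false_append u _ hu]
        simp [dgRef, dgRef_true_append w t hw]

theorem altChunks_flatten (s : List Char) : (altChunks s).flatten = dgRef false s :=
  altChunks_flatten_aux s.length s le_rfl

-- ===== VERDICT (by name: the statement is the Claim_ definition above) =====
theorem delete_garbage_spec : Claim_equal_delete_garbage := by
  intro line _
  unfold Spec_delete_garbage delete_garbage delete_garbage_alt
  rw [foldl_dgStep_eq, join_nil_eq_flatten, altChunks_flatten]
  simp
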